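-- pv_equiv track=rewrite | github.com/BaRzz007/alx-higher_level_programming | 0x03-python-data_structures/8-multiple_returns.py | multiple_returns
-- ===== SOURCE A (Python) =====
-- def multiple_returns(sentence):
--     result_tuple = (0, None)
--     if len(sentence) > 0:
--         for i, elem in enumerate(sentence):
--             if i == 0:
--                 result_tuple = (len(sentence), elem)
--         return result_tuple
--     return result_tuple
-- ===== SOURCE B (Python) =====
-- def multiple_returns(sentence):
--     if len(sentence) == 0:
--         return (0, None)
--     return (len(sentence), next(iter(sentence)))
-- ===== Notes on version B (the rewrite author's own statement) =====
-- stated objective: faster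
-- what changed: B returns (len, first element) in closed form via next(iter(...)) instead of A's full enumerate loop that reassigns the tuple only at index 0.
import Mathlib
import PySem

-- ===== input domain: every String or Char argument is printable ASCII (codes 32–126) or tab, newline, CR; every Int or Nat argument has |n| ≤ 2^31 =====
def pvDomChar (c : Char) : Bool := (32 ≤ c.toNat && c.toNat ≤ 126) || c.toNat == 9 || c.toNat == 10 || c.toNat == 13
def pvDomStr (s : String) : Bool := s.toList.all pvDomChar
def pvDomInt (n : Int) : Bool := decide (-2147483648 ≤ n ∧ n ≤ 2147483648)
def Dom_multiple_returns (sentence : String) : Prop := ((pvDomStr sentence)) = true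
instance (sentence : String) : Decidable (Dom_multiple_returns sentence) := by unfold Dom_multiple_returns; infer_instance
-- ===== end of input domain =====

-- B replaces A's full enumerate loop (which reassigns the tuple only at index 0) by a closed-form
-- (len, first element), removing the O(n) scan.

-- ===== PORT A =====
-- literal port: fold over enumerate(sentence), updating result_tuple when i == 0
def multiple_returns (sentence : String) : Int × Option String :=
  let result_tuple : Int × Option String := (0, none)
  if (PySem.Str.len sentence) > 0 then
    (PySem.List.enumerate sentence.toList).foldl
      (fun result_tuple (p : Int × Char) =>
        if p.1 == 0 then ((PySem.Str.len sentence : Int), some (String.ofList [p.2])) else result_tuple)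
      result_tuple
  else
    result_tuple

-- ===== PORT B =====
def multiple_returns_alt (sentence : String) : Int × Option String :=
  if (PySem.Str.len sentence) == 0 then (0, none)
  else
    match sentence.toList with
    | [] => (0, none)  -- unreachable: len ≠ 0
    | c :: _ => ((PySem.Str.len sentence : Int), some (String.ofList [c]))

-- ===== PRECONDITION & SPEC =====
def Spec_multiple_returns (sentence : String) (out : Int × Option String) : Prop := out = multiple_returns_alt sentence
instance (sentence : String) (out : Int × Option String) : Decidable (Spec_multiple_returns sentence out) := by unfold Spec_multiple_returns; infer_instance

-- ===== CLAIM (what is proved, stated in full; the proofs are below) =====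
def Claim_equal_multiple_returns : Prop := ∀ (sentence : String), Dom_multiple_returns sentence → Spec_multiple_returns sentence (multiple_returns sentence)

-- ===== LEMMAS AND PROOFS =====
-- after the head (index 0), every later enumerate index is ≠ 0, so the fold keeps its state
theorem foldl_keep (acc : Int × Option String) (L : Int) (l : List (Int × Char))
    (h : ∀ p ∈ l, p.1 ≠ 0) :
    l.foldl (fun r (p : Int × Char) =>
        if p.1 == 0 then (L, some (String.ofList [p.2])) else r) acc = acc := by
  induction l generalizing acc with
  | nil => rfl
  | cons p t ih =>
    simp only [List.foldl_cons]
    rw [if_neg (by simpa using h p (List.mem_cons_self))]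
    exact ih acc (fun q hq => h q (List.mem_cons_of_mem _ hq))

-- ===== VERDICT (by name: the statement is the Claim_ definition above) =====
theorem multiple_returns_spec : Claim_equal_multiple_returns := by
  intro sentence _
  unfold Spec_multiple_returns multiple_returns multiple_returns_alt
  cases h : sentence.toList with
  | nil =>
    simp [PySem.Str.len, h]
  | cons c t =>
    have hlen : PySem.Str.len sentence = (t.length + 1 : Int) := by
      simp [PySem.Str.len, h]
    rw [hlen, PySem.List.enumerate_cons]
    show (if ((t.length:Int)+1 > 0) then _ else _) = _
    rw [if_pos (by omega), if_neg (by simp; omega), List.foldl_cons]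
    rw [if_pos (by simp)]
    rw [foldl_keep _ _ _ (by
      intro p hp
      obtain ⟨k, hk, rfl⟩ := (PySem.List.mem_enumerate_iff _ _ _).mp hp
      simp; omega)]
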